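-- pv_equiv track=rewrite | github.com/jgm0327/baekjoon | 프로그래머스/lv2/131127. 할인 행사/할인 행사.py | solution
-- ===== SOURCE A (Python) =====
-- from collections import defaultdict
--
-- def solution(want, number, discount):
--     answer = 0
--     want_count = defaultdict(int)
--     n = len(discount)
--     m = len(want)
--     for idx, product in enumerate(want):
--         want_count[product] = number[idx]
--
--     for i in range(n - 9):
--         cnt = 0
--         dis_count = defaultdict(int)
--         for product in discount[i:i+10]:
--             dis_count[product] += 1
--             if want_count[product] == dis_count[product]:
--                 cnt += 1
--             if cnt == m:
--                 break
--         if cnt == m: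
--             answer += 1
--
--     return answer
-- ===== SOURCE B (Python) =====
-- def solution(want, number, discount):
--     # Sliding window over the fixed-size (10) windows, updating counts and a
--     # satisfied-product counter incrementally instead of rescanning each window.
--     need = {}
--     for i, p in enumerate(want):
--         need[p] = number[i]
--     n = len(discount)
--     m = len(want)
--     if n < 10:
--         return 0
--     cnt = {}
--     sat = 0  # number of distinct products p with need[p] >= 1 and window count >= need[p]
--
--     def bump(p, d):
--         nonlocal sat
--         old = cnt.get(p, 0)
--         cnt[p] = old + d
--         k = need.get(p, 0)
--         if k >= 1:
--             sat += (old + d >= k) - (old >= k)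
--
--     for p in discount[:10]:
--         bump(p, 1)
--     answer = 1 if sat == m else 0
--     for i in range(10, n):
--         bump(discount[i], 1)
--         bump(discount[i - 10], -1)
--         if sat == m:
--             answer += 1
--     return answer
-- ===== Notes on version B (the rewrite author's own statement) =====
-- stated objective: faster
-- what changed: Replaces the per-window rescan (a fresh defaultdict and recount for every 10-element slice) with a single sliding-window pass keeping one running count dict and a satisfied-products counter updated in O(1) per shift; Pre_ excludes only inputs where len(number) < len(want), on which both A and B raise IndexError.
import Mathlib
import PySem

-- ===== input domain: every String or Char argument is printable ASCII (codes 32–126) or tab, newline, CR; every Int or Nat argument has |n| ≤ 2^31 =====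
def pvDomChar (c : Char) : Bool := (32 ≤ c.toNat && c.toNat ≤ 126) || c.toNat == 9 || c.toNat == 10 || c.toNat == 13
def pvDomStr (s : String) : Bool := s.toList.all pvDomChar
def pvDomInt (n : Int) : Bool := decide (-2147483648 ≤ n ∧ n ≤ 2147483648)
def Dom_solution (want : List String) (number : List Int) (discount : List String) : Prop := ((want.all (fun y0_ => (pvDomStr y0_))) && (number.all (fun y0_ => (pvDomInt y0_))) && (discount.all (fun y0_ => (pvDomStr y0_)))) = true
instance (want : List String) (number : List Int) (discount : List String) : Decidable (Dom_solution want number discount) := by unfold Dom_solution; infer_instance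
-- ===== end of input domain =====

-- B replaces A's per-window rescan by one sliding-window pass with an incrementally
-- maintained count dict and satisfied-products counter (objective: faster, constant factor).

-- ===== PORT A =====
-- inner window loop of A, including the early 'break' once cnt == m
def solWin (wc : PySem.Dict String Int) (m : Int) : List String → Int → PySem.Dict String Int → Int
  | [], cnt, _ => cnt
  | p :: rest, cnt, dc =>
      let dc' := dc.insert p (dc.getD p 0 + 1)
      let cnt' := if wc.getD p 0 = dc'.getD p 0 then cnt + 1 else cnt
      if cnt' = m then cnt' else solWin wc m rest cnt' dc'

def solution (want : List String) (number : List Int) (discount : List String) : Int :=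
  -- defaultdict(int): misses read as 0 (the key insertion a defaultdict read performs is unobservable);
  -- number[idx] is in range under Pre_, ported totally as (pyGet? …).getD 0
  let wc := (PySem.List.enumerate want 0).foldl
      (fun d ip => d.insert ip.2 ((PySem.List.pyGet? number ip.1).getD 0)) PySem.Dict.empty
  let n : Int := discount.length
  let m : Int := want.length
  (PySem.List.pyRange 0 (n - 9) 1).foldl
    (fun answer i =>
      let cnt := solWin wc m (PySem.List.slice discount (some i) (some (i + 10))) 0 PySem.Dict.empty
      if cnt = m then answer + 1 else answer) 0

-- ===== PORT B =====
-- Source B's bump(p, d): update the running count of p by d and the satisfied counter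
def bump (need : PySem.Dict String Int) (st : PySem.Dict String Int × Int) (p : String) (d : Int) :
    PySem.Dict String Int × Int :=
  let old := st.1.getD p 0
  let c := st.1.insert p (old + d)
  let k := need.getD p 0
  let sat := if 1 ≤ k then st.2 + ((if k ≤ old + d then 1 else 0) - (if k ≤ old then 1 else 0)) else st.2
  (c, sat)

def solution_alt (want : List String) (number : List Int) (discount : List String) : Int :=
  let need := (PySem.List.enumerate want 0).foldl
      (fun d ip => d.insert ip.2 ((PySem.List.pyGet? number ip.1).getD 0)) PySem.Dict.empty
  let n : Int := discount.length
  let m : Int := want.length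
  if n < 10 then 0 else
    let st0 := (PySem.List.slice discount none (some 10)).foldl (fun st p => bump need st p 1)
      (PySem.Dict.empty, 0)
    let ans0 : Int := if st0.2 = m then 1 else 0
    ((PySem.List.pyRange 10 n 1).foldl
      (fun (acc : (PySem.Dict String Int × Int) × Int) i =>
        let st := bump need acc.1 (PySem.List.pyGetD discount i "") 1
        let st2 := bump need st (PySem.List.pyGetD discount (i - 10) "") (-1)
        (st2, if st2.2 = m then acc.2 + 1 else acc.2)) (st0, ans0)).2

-- ===== PRECONDITION & SPEC =====
-- Pre_ excludes exactly the inputs where number is shorter than want, on which A raises IndexError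
def Pre_solution (want : List String) (number : List Int) (discount : List String) : Prop :=
  want.length ≤ number.length
instance (want : List String) (number : List Int) (discount : List String) : Decidable (Pre_solution want number discount) := by unfold Pre_solution; infer_instance

def pvWitness_solution : List String × List Int × List String :=
  (["a"], [1], ["a", "b", "a", "a", "a", "a", "a", "a", "a", "a", "c"])

def Spec_solution (want : List String) (number : List Int) (discount : List String) (out : Int) : Prop := out = solution_alt want number discount
instance (want : List String) (number : List Int) (discount : List String) (out : Int) : Decidable (Spec_solution want number discount out) := by unfold Spec_solution; infer_instance

-- ===== CLAIM (what is proved, stated in full; the proofs are below) =====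
def Claim_equal_solution : Prop := ∀ (want : List String) (number : List Int) (discount : List String), Dom_solution want number discount → Pre_solution want number discount → Spec_solution want number discount (solution want number discount)

-- ===== LEMMAS AND PROOFS =====

-- number of entries (q, k) of d with 1 ≤ k and k ≤ f q (f = the multiplicity function of a window)
def satF (d : PySem.Dict String Int) (f : String → Int) : Int :=
  (d.items.countP (fun pk => decide (1 ≤ pk.2) && decide (pk.2 ≤ f pk.1)) : Int)

def wcount (w : List String) (q : String) : Int := (w.count q : Int)

def winOf (discount : List String) (j : Nat) : List String := (discount.drop j).take 10

def goodW (need : PySem.Dict String Int) (m : Int) (discount : List String) (j : Nat) : Bool :=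
  decide (satF need (wcount (winOf discount j)) = m)

lemma satF_congr (d : PySem.Dict String Int) (f g : String → Int) (h : ∀ q, f q = g q) :
    satF d f = satF d g := by
  unfold satF
  congr 1
  exact List.countP_congr (fun pk _ => by simp [h pk.1])

lemma satF_le (d : PySem.Dict String Int) (f : String → Int) :
    satF d f ≤ (d.items.length : Int) := by
  unfold satF
  exact_mod_cast List.countP_le_length

lemma satF_mono (d : PySem.Dict String Int) (f g : String → Int) (h : ∀ q, f q ≤ g q) :
    satF d f ≤ satF d g := by
  unfold satF
  have := List.countP_mono_left (l := d.items)
    (p := fun pk => decide (1 ≤ pk.2) && decide (pk.2 ≤ f pk.1))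
    (q := fun pk => decide (1 ≤ pk.2) && decide (pk.2 ≤ g pk.1))
    (fun pk _ hp => by
      simp only [Bool.and_eq_true, decide_eq_true_eq] at hp ⊢
      exact ⟨hp.1, hp.2.trans (h pk.1)⟩)
  exact_mod_cast this

lemma satF_of_nonpos (d : PySem.Dict String Int) (f : String → Int) (h : ∀ q, f q ≤ 0) :
    satF d f = 0 := by
  unfold satF
  norm_num
  intro a b _ h1
  have := h a
  omega

lemma satF_update (d : PySem.Dict String Int) (hn : d.keys.Nodup) (p : String) (v : Int)
    (f : String → Int) :
    satF d (fun q => if q = p then v else f q) = satF d f +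
      (match d.get? p with
       | some k => (if 1 ≤ k ∧ k ≤ v then 1 else 0) - (if 1 ≤ k ∧ k ≤ f p then 1 else 0)
       | none => 0) := by
  rcases h : d.get? p with _ | k
  · -- p is not a key: every entry keeps its predicate value
    have hnp : ∀ pk ∈ d.items, pk.1 ≠ p := by
      intro pk hmem hpk
      have hk : pk.1 ∈ d.keys := PySem.Dict.mem_keys_of_mem_items d hmem
      rw [hpk] at hk
      have hno : p ∉ d.keys := by
        rw [← PySem.Dict.get?_eq_none_iff_not_mem_keys]
        exact h
      exact hno hk
    unfold satF
    norm_num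
    refine List.countP_congr (fun pk hm => ?_)
    simp [if_neg (hnp pk hm)]
  · have hmem : (p, k) ∈ d.items := PySem.Dict.mem_items_of_get?_eq_some d h
    obtain ⟨l₁, l₂, hsplit⟩ := List.append_of_mem hmem
    have hnd : (d.items.map Prod.fst).Nodup := hn
    rw [hsplit, List.map_append, List.map_cons, List.nodup_append] at hnd
    have hp1 : ∀ pk ∈ l₁, pk.1 ≠ p := by
      intro pk hpk heq
      have h1 : pk.1 ∈ List.map Prod.fst l₁ := List.mem_map_of_mem (f := Prod.fst) hpk
      have h2 : pk.1 ∈ (p, k).1 :: List.map Prod.fst l₂ := by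
        rw [heq]; exact List.mem_cons_self ..
      exact hnd.2.2 pk.1 h1 pk.1 h2 rfl
    have hp2 : ∀ pk ∈ l₂, pk.1 ≠ p := by
      intro pk hpk heq
      have h1 : pk.1 ∈ List.map Prod.fst l₂ := List.mem_map_of_mem (f := Prod.fst) hpk
      rw [heq] at h1
      exact (List.nodup_cons.mp hnd.2.1).1 h1
    have c1 : ∀ g : String → Int,
        l₁.countP (fun pk => decide (1 ≤ pk.2) && decide (pk.2 ≤ (if pk.1 = p then v else g pk.1)))
          = l₁.countP (fun pk => decide (1 ≤ pk.2) && decide (pk.2 ≤ g pk.1)) := by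
      intro g
      refine List.countP_congr (fun pk hm => ?_)
      simp [if_neg (hp1 pk hm)]
    have c2 : ∀ g : String → Int,
        l₂.countP (fun pk => decide (1 ≤ pk.2) && decide (pk.2 ≤ (if pk.1 = p then v else g pk.1)))
          = l₂.countP (fun pk => decide (1 ≤ pk.2) && decide (pk.2 ≤ g pk.1)) := by
      intro g
      refine List.countP_congr (fun pk hm => ?_)
      simp [if_neg (hp2 pk hm)]
    unfold satF
    rw [hsplit]
    simp only [List.countP_append, List.countP_cons, c1 f, c2 f]
    push_cast
    simp only [if_pos rfl, Bool.and_eq_true, decide_eq_true_eq]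
    split_ifs <;> simp_all <;> omega

-- the one-step delta when the p-count rises from f p (≥ 0) to f p + 1
lemma satF_update_succ (d : PySem.Dict String Int) (hn : d.keys.Nodup) (p : String)
    (f : String → Int) (hf : 0 ≤ f p) :
    satF d (fun q => if q = p then f p + 1 else f q)
      = satF d f + (if d.getD p 0 = f p + 1 then 1 else 0) := by
  rw [satF_update d hn p (f p + 1) f]
  rcases h : d.get? p with _ | k
  · have hd : d.getD p 0 = 0 := by rw [PySem.Dict.getD_eq_get?_getD, h]; rfl
    rw [hd, if_neg (by omega)]
  · have hd : d.getD p 0 = k := by rw [PySem.Dict.getD_eq_get?_getD, h]; rfl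
    rw [hd]
    have hm : (match (some k : Option Int) with
       | some k => ((if 1 ≤ k ∧ k ≤ f p + 1 then 1 else 0) - (if 1 ≤ k ∧ k ≤ f p then 1 else 0) : Int)
       | none => 0) = ((if 1 ≤ k ∧ k ≤ f p + 1 then 1 else 0) - (if 1 ≤ k ∧ k ≤ f p then 1 else 0) : Int) := rfl
    rw [hm]
    split_ifs <;> omega

lemma wcount_append_singleton (u : List String) (p q : String) :
    wcount (u ++ [p]) q = wcount u q + (if q = p then 1 else 0) := by
  unfold wcount
  rw [List.count_append]
  by_cases h : q = p
  · subst h; simp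
  · rw [List.count_singleton]
    simp only [beq_iff_eq]
    rw [if_neg (fun hh => h hh.symm), if_neg h]
    omega

lemma bump_spec (need : PySem.Dict String Int) (hn : need.keys.Nodup)
    (c : PySem.Dict String Int) (p : String) (d : Int) :
    bump need (c, satF need (fun q => c.getD q 0)) p d
      = (c.insert p (c.getD p 0 + d),
         satF need (fun q => (c.insert p (c.getD p 0 + d)).getD q 0)) := by
  unfold bump
  refine Prod.ext rfl ?_
  simp only
  have hins : ∀ q, (c.insert p (c.getD p 0 + d)).getD q 0
      = if q = p then c.getD p 0 + d else c.getD q 0 := fun q =>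
    PySem.Dict.getD_insert c p q (c.getD p 0 + d) 0
  rw [satF_congr _ _ _ hins,
    satF_update need hn p (c.getD p 0 + d) (fun q => c.getD q 0)]
  rcases hk : need.get? p with _ | k
  · have hd : need.getD p 0 = 0 := by rw [PySem.Dict.getD_eq_get?_getD, hk]; rfl
    rw [hd, if_neg (by omega)]
    have hm0 : (match (none : Option Int) with
       | some k => ((if 1 ≤ k ∧ k ≤ c.getD p 0 + d then 1 else 0)
            - (if 1 ≤ k ∧ k ≤ c.getD p 0 then 1 else 0) : Int)
       | none => 0) = 0 := rfl
    rw [hm0]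
    ring
  · have hd : need.getD p 0 = k := by rw [PySem.Dict.getD_eq_get?_getD, hk]; rfl
    rw [hd]
    have hm : (match (some k : Option Int) with
       | some k => ((if 1 ≤ k ∧ k ≤ c.getD p 0 + d then 1 else 0)
            - (if 1 ≤ k ∧ k ≤ c.getD p 0 then 1 else 0) : Int)
       | none => 0) = ((if 1 ≤ k ∧ k ≤ c.getD p 0 + d then 1 else 0)
            - (if 1 ≤ k ∧ k ≤ c.getD p 0 then 1 else 0) : Int) := rfl
    rw [hm]
    split_ifs <;> omega

-- count of a one-element extension
lemma wcount_le_append (u v : List String) (q : String) : wcount u q ≤ wcount (u ++ v) q := by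
  unfold wcount
  rw [List.count_append]
  push_cast
  omega

-- fold of bump (+1) over w starting from counts of u: ends in counts of u ++ w
lemma init_fold (need : PySem.Dict String Int) (hn : need.keys.Nodup) :
    ∀ (w u : List String) (c : PySem.Dict String Int),
      (∀ q, c.getD q 0 = wcount u q) →
      (∀ q, (w.foldl (fun st p => bump need st p 1) (c, satF need (fun q => c.getD q 0))).1.getD q 0
          = wcount (u ++ w) q) ∧
      (w.foldl (fun st p => bump need st p 1) (c, satF need (fun q => c.getD q 0))).2
        = satF need (fun q =>
            (w.foldl (fun st p => bump need st p 1) (c, satF need (fun q => c.getD q 0))).1.getD q 0) := by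
  intro w
  induction w with
  | nil =>
    intro u c hc
    refine ⟨fun q => ?_, by rfl⟩
    simpa using hc q
  | cons p rest ih =>
    intro u c hc
    rw [List.foldl_cons, bump_spec need hn c p 1]
    have hc' : ∀ q, (c.insert p (c.getD p 0 + 1)).getD q 0 = wcount (u ++ [p]) q := by
      intro q
      rw [PySem.Dict.getD_insert c p q (c.getD p 0 + 1) 0, wcount_append_singleton]
      split_ifs with h
      · rw [h, hc p]
      · rw [hc q]; ring
    have hind := ih (u ++ [p]) (c.insert p (c.getD p 0 + 1)) hc'
    rw [List.append_cons u p rest]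
    exact hind

-- sliding-window multiplicity identity
lemma slide_count (D : List String) (j : Nat) (h : j + 11 ≤ D.length) (q : String) :
    wcount (winOf D (j + 1)) q + (if q = D.getD j "" then 1 else 0)
      = wcount (winOf D j) q + (if q = D.getD (j + 10) "" then 1 else 0) := by
  have hj : j < D.length := by omega
  have hj10 : j + 10 < D.length := by omega
  have h9 : 9 < (D.drop (j + 1)).length := by
    rw [List.length_drop]; omega
  have hdrop : D.drop j = D[j] :: D.drop (j + 1) := List.drop_eq_getElem_cons hj
  have hget : (D.drop (j + 1))[9]'h9 = D[j + 10]'hj10 := by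
    rw [List.getElem_drop]
  have htake : (D.drop (j + 1)).take 10 = (D.drop (j + 1)).take 9 ++ [D[j + 10]'hj10] := by
    conv_lhs => rw [show (10 : Nat) = 9 + 1 from rfl]
    rw [List.take_succ, List.getElem?_eq_getElem h9, hget]
    rfl
  have hcons : (D[j] :: D.drop (j + 1)).take 10 = D[j] :: (D.drop (j + 1)).take 9 := by
    rw [show (10 : Nat) = 9 + 1 from rfl, List.take_succ_cons]
  have hgd1 : D.getD j "" = D[j]'hj := List.getD_eq_getElem D "" hj
  have hgd2 : D.getD (j + 10) "" = D[j + 10]'hj10 := List.getD_eq_getElem D "" hj10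
  have key : ∀ (a b : String) (t : List String) (x : String),
      ((t ++ [a]).count x : Int) + (if x = b then 1 else 0)
        = ((b :: t).count x : Int) + (if x = a then 1 else 0) := by
    intro a b t x
    rw [List.count_append, List.count_cons]
    by_cases h1 : x = a <;> by_cases h2 : x = b <;>
      simp [h1, h2, List.count_cons, List.count_nil] <;>
      split_ifs <;>
      first
      | omega
      | (exfalso; exact ‹¬a = b› ‹b = a›.symm)
      | (exfalso; exact ‹¬b = a› ‹a = b›.symm)
      | (exfalso; exact ‹¬x = a› ‹a = x›.symm)
      | (exfalso; exact ‹¬x = b› ‹b = x›.symm)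
  unfold winOf wcount
  rw [hdrop, htake, hcons, hgd1, hgd2]
  exact key (D[j + 10]'hj10) (D[j]'hj) ((D.drop (j + 1)).take 9) q

-- A's inner loop (with break) decides 'satF of the whole window = m'
lemma solWin_iff (need : PySem.Dict String Int) (hn : need.keys.Nodup) (m : Int)
    (hmb : (need.items.length : Int) ≤ m) :
    ∀ (rest u : List String) (dc : PySem.Dict String Int),
      (∀ q, dc.getD q 0 = wcount u q) →
      (solWin need m rest (satF need (wcount u)) dc = m ↔ satF need (wcount (u ++ rest)) = m) := by
  intro rest
  induction rest with
  | nil =>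
    intro u dc hdc
    rw [List.append_nil]
    exact Iff.rfl
  | cons p rest ih =>
    intro u dc hdc
    have hdc' : ∀ q, (dc.insert p (dc.getD p 0 + 1)).getD q 0 = wcount (u ++ [p]) q := by
      intro q
      rw [PySem.Dict.getD_insert dc p q (dc.getD p 0 + 1) 0, wcount_append_singleton]
      split_ifs with h
      · rw [h, hdc p]
      · rw [hdc q]; ring
    have h1 : (dc.insert p (dc.getD p 0 + 1)).getD p 0 = wcount u p + 1 := by
      rw [hdc' p, wcount_append_singleton]
      simp
    have h2 : satF need (wcount (u ++ [p]))
        = satF need (fun q => if q = p then wcount u p + 1 else wcount u q) := by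
      apply satF_congr
      intro q
      rw [wcount_append_singleton]
      split_ifs with h
      · rw [h]
      · ring
    have hstep : (if need.getD p 0 = (dc.insert p (dc.getD p 0 + 1)).getD p 0
          then satF need (wcount u) + 1 else satF need (wcount u))
        = satF need (wcount (u ++ [p])) := by
      rw [h1, h2, satF_update_succ need hn p (wcount u) (by unfold wcount; positivity)]
      split_ifs <;> omega
    show (if (if need.getD p 0 = (dc.insert p (dc.getD p 0 + 1)).getD p 0
            then satF need (wcount u) + 1 else satF need (wcount u)) = m
          then (if need.getD p 0 = (dc.insert p (dc.getD p 0 + 1)).getD p 0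
            then satF need (wcount u) + 1 else satF need (wcount u))
          else solWin need m rest
            (if need.getD p 0 = (dc.insert p (dc.getD p 0 + 1)).getD p 0
              then satF need (wcount u) + 1 else satF need (wcount u))
            (dc.insert p (dc.getD p 0 + 1))) = m
        ↔ satF need (wcount (u ++ p :: rest)) = m
    rw [hstep, List.append_cons u p rest]
    by_cases hbm : satF need (wcount (u ++ [p])) = m
    · rw [if_pos hbm]
      have hle : satF need (wcount ((u ++ [p]) ++ rest)) ≤ m :=
        le_trans (satF_le need _) hmb
      have hge : m ≤ satF need (wcount ((u ++ [p]) ++ rest)) := by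
        rw [← hbm]
        exact satF_mono need _ _ (fun q => wcount_le_append (u ++ [p]) rest q)
      constructor
      · intro _; omega
      · intro _; exact hbm
    · rw [if_neg hbm]
      exact ih (u ++ [p]) (dc.insert p (dc.getD p 0 + 1)) hdc'

-- B's main loop accumulates exactly the indicators of the remaining windows
lemma b_loop (need : PySem.Dict String Int) (hn : need.keys.Nodup) (m : Int) (D : List String) :
    ∀ (k : Nat) (i : Int) (c : PySem.Dict String Int) (acc : Int),
      i = (D.length : Int) - k → 10 ≤ i →
      (∀ q, c.getD q 0 = wcount (winOf D (i.toNat - 10)) q) →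
      ((PySem.List.pyRange i D.length 1).foldl
        (fun (acc : (PySem.Dict String Int × Int) × Int) i =>
          let st := bump need acc.1 (PySem.List.pyGetD D i "") 1
          let st2 := bump need st (PySem.List.pyGetD D (i - 10) "") (-1)
          (st2, if st2.2 = m then acc.2 + 1 else acc.2))
        ((c, satF need (fun q => c.getD q 0)), acc)).2
      = acc + ((PySem.List.pyRange (i - 9) ((D.length : Int) - 9) 1).countP
          (fun j => goodW need m D j.toNat) : Int) := by
  intro k
  induction k with
  | zero =>
    intro i c acc hi h10 hcnt
    have hni : (D.length : Int) ≤ i := by push_cast at hi; omega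
    rw [PySem.List.pyRange_one_eq_nil hni, PySem.List.pyRange_one_eq_nil (by omega)]
    simp
  | succ k ih =>
    intro i c acc hi h10 hcnt
    push_cast at hi
    have hin : i < (D.length : Int) := by omega
    have hi0 : (0 : Int) ≤ i := by omega
    have hjn : i.toNat - 10 + 11 ≤ D.length := by omega
    have hjj : i.toNat - 10 + 1 = (i + 1).toNat - 10 := by omega
    have hP1 : PySem.List.pyGetD D i "" = D.getD i.toNat "" := by
      rw [PySem.List.pyGetD_eq_getElem D "" hi0 hin, List.getD_eq_getElem D "" (by omega)]
    have hP2 : PySem.List.pyGetD D (i - 10) "" = D.getD (i.toNat - 10) "" := by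
      rw [PySem.List.pyGetD_eq_getElem D "" (by omega) (by omega),
        List.getD_eq_getElem D "" (by omega)]
      congr 1
      omega
    have hgd10 : D.getD (i.toNat - 10 + 10) "" = D.getD i.toNat "" := by
      congr 1
      omega
    rw [PySem.List.pyRange_one_cons hin, List.foldl_cons]
    simp only [hP1, hP2]
    rw [bump_spec need hn c (D.getD i.toNat "") 1]
    rw [bump_spec need hn (c.insert (D.getD i.toNat "") (c.getD (D.getD i.toNat "") 0 + 1))
      (D.getD (i.toNat - 10) "") (-1)]
    set a := D.getD (i.toNat - 10) "" with ha
    set b := D.getD i.toNat "" with hb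
    set c2 := (c.insert b (c.getD b 0 + 1)).insert a
        ((c.insert b (c.getD b 0 + 1)).getD a 0 + (-1)) with hc2
    have hcnt2 : ∀ q, c2.getD q 0 = wcount (winOf D ((i + 1).toNat - 10)) q := by
      intro q
      have hs := slide_count D (i.toNat - 10) hjn q
      rw [hgd10] at hs
      rw [← hjj]
      rw [hc2]
      simp only [PySem.Dict.getD_insert]
      by_cases h1 : q = a
      · by_cases h3 : a = b
        · rw [if_pos h1, if_pos h3, hcnt b]
          rw [if_pos h1, if_pos (h1.trans h3)] at hs
          rw [h1, h3] at hs ⊢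
          omega
        · rw [if_pos h1, if_neg h3, hcnt a]
          rw [if_pos h1, if_neg (fun hh => h3 (h1.symm.trans hh))] at hs
          rw [h1] at hs ⊢
          omega
      · by_cases h2 : q = b
        · rw [if_neg h1, if_pos h2, hcnt b]
          rw [if_neg h1, if_pos h2] at hs
          rw [h2] at hs ⊢
          omega
        · rw [if_neg h1, if_neg h2, hcnt q]
          rw [if_neg h1, if_neg h2] at hs
          omega
    have hsat2 : satF need (fun q => c2.getD q 0)
        = satF need (wcount (winOf D ((i + 1).toNat - 10))) :=
      satF_congr need _ _ hcnt2
    have hih := ih (i + 1) c2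
      (if satF need (fun q => c2.getD q 0) = m then acc + 1 else acc)
      (by push_cast; omega) (by omega) hcnt2
    rw [hih]
    have hr : i - 9 + 1 = i + 1 - 9 := by ring
    rw [PySem.List.pyRange_one_cons (show i - 9 < (D.length : Int) - 9 by omega), hr,
      List.countP_cons, hsat2]
    have hidx : (i - 9).toNat = (i + 1).toNat - 10 := by omega
    by_cases hg : satF need (wcount (winOf D ((i + 1).toNat - 10))) = m
    · simp only [if_pos hg, goodW, hidx, hg, decide_true]
      push_cast
      omega
    · simp only [if_neg hg, goodW, hidx]
      rw [decide_eq_false hg]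
      push_cast
      omega

lemma need_items_le (g : Int × String → Int) :
    ∀ (l : List (Int × String)) (d : PySem.Dict String Int),
      ((l.foldl (fun d ip => d.insert ip.2 (g ip)) d).items.length ≤ d.items.length + l.length) := by
  intro l
  induction l with
  | nil => intro d; simp
  | cons x xs ih =>
    intro d
    refine le_trans (ih _) ?_
    have : (d.insert x.2 (g x)).items.length ≤ d.items.length + 1 := by
      rw [PySem.Dict.items_insert]
      split <;> simp
    simp only [List.foldl_cons, List.length_cons]
    omega

-- ===== VERDICT (by name: the statement is the Claim_ definition above) =====
theorem solution_spec : Claim_equal_solution := by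
  intro want number discount _ _
  unfold Spec_solution
  simp only [solution, solution_alt]
  set need := (PySem.List.enumerate want 0).foldl
      (fun d ip => d.insert ip.2 ((PySem.List.pyGet? number ip.1).getD 0)) PySem.Dict.empty
    with hneed
  have hn : need.keys.Nodup := by
    rw [hneed]
    exact PySem.Dict.nodup_keys_foldl_insert_key (PySem.List.enumerate want 0) Prod.snd
      (fun d ip => (PySem.List.pyGet? number ip.1).getD 0) PySem.Dict.empty
      PySem.Dict.nodup_keys_empty
  have hml : need.items.length ≤ want.length := by
    rw [hneed]
    have := need_items_le (fun ip => (PySem.List.pyGet? number ip.1).getD 0)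
      (PySem.List.enumerate want 0) PySem.Dict.empty
    have hz : (PySem.Dict.empty : PySem.Dict String Int).items.length = 0 := rfl
    simpa [PySem.List.length_enumerate, hz] using this
  have hmb : (need.items.length : Int) ≤ ((want.length : Nat) : Int) := by exact_mod_cast hml
  by_cases hlen : (discount.length : Int) < 10
  · rw [if_pos hlen, PySem.List.pyRange_one_eq_nil (by omega)]
    rfl
  · rw [if_neg hlen]
    have hlen' : 10 ≤ discount.length := by omega
    -- A side: rewrite the per-window loop into a countP over good windows
    have hA : (PySem.List.pyRange 0 ((discount.length : Int) - 9) 1).foldl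
        (fun answer i =>
          if solWin need (want.length : Int)
              (PySem.List.slice discount (some i) (some (i + 10))) 0 PySem.Dict.empty
              = (want.length : Int)
          then answer + 1 else answer) 0
      = ((PySem.List.pyRange 0 ((discount.length : Int) - 9) 1).countP
          (fun i => goodW need (want.length : Int) discount i.toNat) : Int) := by
      rw [PySem.List.foldl_congr_mem _ _
        (fun answer i =>
          if goodW need (want.length : Int) discount i.toNat = true then answer + 1 else answer) 0
        ?_]
      · rw [PySem.List.foldl_if_add_one]
        ring
      · intro acc x hx
        have hx0 : (0 : Int) ≤ x := (PySem.List.mem_pyRange_one.mp hx).1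
        have hsl : PySem.List.slice discount (some x) (some (x + 10)) = winOf discount x.toNat := by
          rw [PySem.List.slice_toNat discount hx0 (by omega)]
          unfold winOf
          congr 1
          omega
        have h0 : satF need (wcount ([] : List String)) = 0 :=
          satF_of_nonpos _ _ (fun q => by unfold wcount; simp)
        have hiff := solWin_iff need hn (want.length : Int) hmb (winOf discount x.toNat) []
          PySem.Dict.empty (fun q => by unfold wcount; simp [PySem.Dict.getD_empty])
        rw [h0] at hiff
        simp only [List.nil_append] at hiff
        rw [hsl]
        by_cases hc : satF need (wcount (winOf discount x.toNat)) = (want.length : Int)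
        · rw [if_pos (hiff.mpr hc)]
          simp [goodW, hc]
        · rw [if_neg (fun hh => hc (hiff.mp hh))]
          simp [goodW, hc]
    rw [hA]
    -- B side: initial window then sliding loop
    have hsl0 : PySem.List.slice discount none (some 10) = winOf discount 0 := by
      rw [PySem.List.slice_to discount (by norm_num)]
      unfold winOf
      norm_num
      rfl
    rw [hsl0]
    set F0 := (winOf discount 0).foldl (fun st p => bump need st p 1)
      (PySem.Dict.empty, (0 : Int)) with hF0def
    have hinit := init_fold need hn (winOf discount 0) [] PySem.Dict.empty
      (fun q => by unfold wcount; simp [PySem.Dict.getD_empty])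
    have h00 : satF need (fun q => (PySem.Dict.empty : PySem.Dict String Int).getD q 0) = 0 :=
      satF_of_nonpos _ _ (fun q => by simp [PySem.Dict.getD_empty])
    rw [h00] at hinit
    simp only [List.nil_append, ← hF0def] at hinit
    obtain ⟨hc0, hs0⟩ := hinit
    have hpair : ((F0.1, satF need fun q => F0.1.getD q 0) : PySem.Dict String Int × Int) = F0 := by
      apply Prod.ext
      · rfl
      · exact hs0.symm
    have hcnt0 : ∀ q, F0.1.getD q 0 = wcount (winOf discount ((10 : Int).toNat - 10)) q := by
      intro q
      have : (10 : Int).toNat - 10 = 0 := by norm_num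
      rw [this]
      exact hc0 q
    have happ := b_loop need hn (want.length : Int) discount (discount.length - 10) 10 F0.1
      (if F0.2 = (want.length : Int) then 1 else 0)
      (by push_cast [Nat.cast_sub hlen']; ring) (by norm_num) hcnt0
    rw [hpair] at happ
    rw [happ]
    have hsat0 : F0.2 = satF need (wcount (winOf discount 0)) :=
      hs0.trans (satF_congr need _ _ hc0)
    rw [PySem.List.pyRange_one_cons (show (0 : Int) < (discount.length : Int) - 9 by omega),
      List.countP_cons]
    have hr1 : (0 : Int) + 1 = 10 - 9 := by norm_num
    rw [hr1]
    have hg0 : goodW need (want.length : Int) discount (0 : Int).toNat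
        = decide (satF need (wcount (winOf discount 0)) = (want.length : Int)) := rfl
    rw [hg0, hsat0]
    by_cases hg : satF need (wcount (winOf discount 0)) = (want.length : Int)
    · simp only [hg, decide_true, if_pos]
      push_cast
      ring
    · rw [decide_eq_false hg, if_neg hg]
      push_cast
      ring
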